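-- pv_equiv track=rewrite | github.com/V1perZerofy/Advent-Of-Code-2021 | 2018/day2.py | part1
-- ===== SOURCE A (Python) =====
-- def part1(data):
--     two = 0
--     three = 0
--     for i in data:
--         seen = {}
--         for j in i:
--             if j in seen:
--                 seen[j] += 1
--             else:
--                 seen[j] = 1
--         if 2 in seen.values():
--             two += 1
--         if 3 in seen.values():
--             three += 1
--     return two * three
-- ===== SOURCE B (Python) =====
-- def part1(data):
--     two = 0
--     three = 0
--     for s in data:
--         runs = []
--         rest = sorted(s)
--         while rest:
--             c = rest[0]
--             k = 1
--             while k < len(rest) and rest[k] == c: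
--                 k += 1
--             runs.append(k)
--             rest = rest[k:]
--         if 2 in runs:
--             two += 1
--         if 3 in runs:
--             three += 1
--     return two * three
-- ===== Notes on version B (the rewrite author's own statement) =====
-- stated objective: alternative
-- what changed: Per string, replaces the hash-map character counter with sorting the characters and scanning consecutive runs, checking whether 2 or 3 occurs among the run lengths.
import Mathlib
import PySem

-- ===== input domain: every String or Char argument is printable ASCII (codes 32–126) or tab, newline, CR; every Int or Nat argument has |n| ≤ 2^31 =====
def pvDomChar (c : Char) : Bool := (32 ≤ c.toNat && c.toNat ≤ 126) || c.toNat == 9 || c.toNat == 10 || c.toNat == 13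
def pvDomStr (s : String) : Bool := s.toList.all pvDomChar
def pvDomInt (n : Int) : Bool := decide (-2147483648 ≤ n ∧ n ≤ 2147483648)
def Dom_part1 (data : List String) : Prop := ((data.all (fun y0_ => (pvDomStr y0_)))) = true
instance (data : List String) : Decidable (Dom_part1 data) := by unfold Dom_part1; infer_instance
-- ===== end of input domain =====

-- B replaces the per-string hash-map character counter with a sort-then-scan of consecutive runs (alternative algorithm, same result).


-- ===== PORT A =====
-- per-character counting dict, then membership of 2 / 3 in its values
def part1 (data : List String) : Int :=
  let p := data.foldl
    (fun (tt : Int × Int) i =>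
      let seen := i.toList.foldl
        (fun (d : PySem.Dict Char Int) j =>
          if d.contains j then d.insert j (d.getD j 0 + 1) else d.insert j 1)
        PySem.Dict.empty
      ((if (2 : Int) ∈ seen.values then tt.1 + 1 else tt.1),
       (if (3 : Int) ∈ seen.values then tt.2 + 1 else tt.2)))
    (0, 0)
  p.1 * p.2

-- ===== PORT B =====
-- run lengths of a list: length of the leading run, then recurse on the remainder
def runLens : List Char → List Int
  | [] => []
  | c :: rest =>
      (1 + ((rest.takeWhile (· == c)).length : Int)) ::
        runLens (rest.dropWhile (· == c))
termination_by l => l.length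
decreasing_by
  exact Nat.lt_succ_of_le (List.length_dropWhile_le _ _)

def part1_alt (data : List String) : Int :=
  let p := data.foldl
    (fun (tt : Int × Int) s =>
      let runs := runLens (PySem.List.sorted s.toList (fun x => x) false)
      ((if (2 : Int) ∈ runs then tt.1 + 1 else tt.1),
       (if (3 : Int) ∈ runs then tt.2 + 1 else tt.2)))
    (0, 0)
  p.1 * p.2

-- ===== PRECONDITION & SPEC =====
def Spec_part1 (data : List String) (out : Int) : Prop := out = part1_alt data
instance (data : List String) (out : Int) : Decidable (Spec_part1 data out) := by unfold Spec_part1; infer_instance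

-- ===== CLAIM (what is proved, stated in full; the proofs are below) =====
def Claim_equal_part1 : Prop := ∀ (data : List String), Dom_part1 data → Spec_part1 data (part1 data)

-- ===== LEMMAS AND PROOFS =====

-- A's counting loop builds exactly the Counter of the character list
theorem counterLoop_eq_counter (l : List Char) :
    l.foldl (fun (d : PySem.Dict Char Int) j =>
        if d.contains j then d.insert j (d.getD j 0 + 1) else d.insert j 1)
      PySem.Dict.empty = PySem.Dict.counter l := by
  rw [← PySem.Dict.foldl_insert_getD_add_one_eq_counter]
  congr 1
  funext d j
  by_cases h : d.contains j = true
  · simp [h]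
  · simp only [Bool.not_eq_true] at h
    simp [h, PySem.Dict.getD_of_not_contains d 0 h]

-- membership in the Counter's values says: some character has exactly this count
theorem mem_counter_values (l : List Char) (k : Int) :
    k ∈ (PySem.Dict.counter l).values ↔ ∃ c ∈ l, (l.count c : Int) = k := by
  have hv : (PySem.Dict.counter l).values
      = ((PySem.Dict.counter l).items).map Prod.snd := rfl
  rw [hv, PySem.Dict.items_counter]
  simp [List.mem_map, PySem.Set.mem_ofList]

-- membership in the run lengths of a sorted character list is the same statement
theorem mem_runLens (l : List Char) (hp : l.Pairwise (· ≤ ·)) (k : Int) :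
    k ∈ runLens l ↔ ∃ c ∈ l, (l.count c : Int) = k := by
  induction l using runLens.induct with
  | case1 => simp [runLens]
  | case2 c rest ih =>
    set t := rest.takeWhile (· == c) with ht
    set d := rest.dropWhile (· == c) with hd
    have hrest : t ++ d = rest := List.takeWhile_append_dropWhile
    have htc : ∀ x ∈ t, x = c := by
      intro x hx
      have := List.mem_takeWhile_imp hx
      simpa using this
    -- every element of d is strictly greater than c (d starts at the first non-c element)
    have hdc : ∀ x ∈ d, c < x := by
      intro x hx
      rcases hq : d with _ | ⟨d0, d'⟩
      · simp [hq] at hx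
      · have heq : rest.dropWhile (· == c) = d0 :: d' := hd.symm.trans hq
        have hne : rest.dropWhile (· == c) ≠ [] := by rw [heq]; simp
        have hd0f := List.head_dropWhile_not (· == c) hne
        have hd0c : d0 ≠ c := by
          simp only [heq, List.head_cons] at hd0f
          simpa using hd0f
        have hd0mem : d0 ∈ rest := by
          rw [← hrest, hq]; exact List.mem_append_right _ (List.mem_cons_self ..)
        have hd0lt : c < d0 :=
          lt_of_le_of_ne ((List.pairwise_cons.mp hp).1 d0 hd0mem) (Ne.symm hd0c)
        have hpd : List.Pairwise (· ≤ ·) d := by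
          have hsub : d.Sublist (c :: rest) :=
            (List.dropWhile_sublist _).trans (List.sublist_cons_self _ _)
          exact hp.sublist hsub
        rw [hq] at hx
        rcases List.mem_cons.mp hx with h | h
        · exact h ▸ hd0lt
        · have hle : d0 ≤ x := by
            rw [hq] at hpd
            exact (List.pairwise_cons.mp hpd).1 x h
          exact lt_of_lt_of_le hd0lt hle
    have hxd_ne : ∀ x ∈ d, x ≠ c := fun x hx => ne_of_gt (hdc x hx)
    have hcd : d.count c = 0 := by
      rw [List.count_eq_zero]
      intro hcmem
      exact (hxd_ne c hcmem) rfl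
    have hct : t.count c = t.length := by
      rw [List.count_eq_length]
      intro x hx; exact ((htc x hx) ▸ rfl : c = x)
    have hcount_c : (c :: rest).count c = 1 + t.length := by
      rw [← hrest, List.count_cons, List.count_append, hct, hcd]
      simp; omega
    have hcount_d : ∀ x ∈ d, (c :: rest).count x = d.count x := by
      intro x hx
      have hxc := hxd_ne x hx
      have hxt : t.count x = 0 := by
        rw [List.count_eq_zero]
        intro hxt
        exact hxc (htc x hxt)
      rw [← hrest, List.count_cons, List.count_append, hxt]
      simp [Ne.symm hxc]
    have hpd : List.Pairwise (· ≤ ·) d := by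
      have hsub : d.Sublist (c :: rest) :=
        (List.dropWhile_sublist _).trans (List.sublist_cons_self _ _)
      exact hp.sublist hsub
    have ihd := ih hpd
    rw [runLens]
    rw [List.mem_cons]
    constructor
    · rintro (h | h)
      · refine ⟨c, by simp, ?_⟩
        rw [hcount_c, h]; push_cast; ring
      · rcases ihd.mp h with ⟨x, hx, hxk⟩
        refine ⟨x, ?_, ?_⟩
        · have : x ∈ t ++ d := List.mem_append_right _ hx
          rw [hrest] at this
          exact List.mem_cons.mpr (Or.inr this)
        · rw [hcount_d x hx]; exact hxk
    · rintro ⟨x, hx, hxk⟩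
      have hx' : x = c ∨ x ∈ t ∨ x ∈ d := by
        rcases List.mem_cons.mp hx with h | h
        · exact Or.inl h
        · rw [← hrest] at h
          rcases List.mem_append.mp h with h | h
          · exact Or.inr (Or.inl h)
          · exact Or.inr (Or.inr h)
      have hxcase : x = c ∨ x ∈ d := by
        rcases hx' with h | h | h
        · exact Or.inl h
        · exact Or.inl (htc x h)
        · exact Or.inr h
      rcases hxcase with h | h
      · left
        rw [h, hcount_c] at hxk
        push_cast at hxk ⊢
        rw [← ht]
        omega
      · right
        refine ihd.mpr ⟨x, h, ?_⟩
        rw [hcount_d x h] at hxk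
        exact hxk

-- per string: A's membership test equals B's membership test
theorem key_iff (s : String) (k : Int) :
    k ∈ (s.toList.foldl (fun (d : PySem.Dict Char Int) j =>
          if d.contains j then d.insert j (d.getD j 0 + 1) else d.insert j 1)
        PySem.Dict.empty).values
      ↔ k ∈ runLens (PySem.List.sorted s.toList (fun x => x) false) := by
  rw [counterLoop_eq_counter, mem_counter_values]
  have hperm := PySem.List.sorted_perm s.toList (fun x => x) false
  have hp : (PySem.List.sorted s.toList (fun x => x) false).Pairwise (· ≤ ·) :=
    PySem.List.sorted_pairwise s.toList (fun x => x)
  rw [mem_runLens _ hp]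
  constructor
  · rintro ⟨c, hc, hk⟩
    exact ⟨c, hperm.mem_iff.mpr hc, by rw [hperm.count_eq]; exact hk⟩
  · rintro ⟨c, hc, hk⟩
    exact ⟨c, hperm.mem_iff.mp hc, by rw [← hperm.count_eq]; exact hk⟩

-- the two per-string loop bodies are the same function
theorem step_eq :
    (fun (tt : Int × Int) (i : String) =>
      let seen := i.toList.foldl
        (fun (d : PySem.Dict Char Int) j =>
          if d.contains j then d.insert j (d.getD j 0 + 1) else d.insert j 1)
        PySem.Dict.empty
      ((if (2 : Int) ∈ seen.values then tt.1 + 1 else tt.1),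
       (if (3 : Int) ∈ seen.values then tt.2 + 1 else tt.2)))
    = (fun (tt : Int × Int) (s : String) =>
      let runs := runLens (PySem.List.sorted s.toList (fun x => x) false)
      ((if (2 : Int) ∈ runs then tt.1 + 1 else tt.1),
       (if (3 : Int) ∈ runs then tt.2 + 1 else tt.2))) := by
  funext tt s
  simp only
  rw [if_congr (key_iff s 2) rfl rfl, if_congr (key_iff s 3) rfl rfl]

-- ===== VERDICT (by name: the statement is the Claim_ definition above) =====
theorem part1_spec : Claim_equal_part1 := by
  intro data _
  unfold Spec_part1 part1 part1_alt
  rw [step_eq]
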